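-- pv_equiv track=rewrite | github.com/fphammerle/tchibo-287717-weather-station-signal | plot.py | trim_where
-- ===== SOURCE A (Python) =====
-- import typing
--
-- def trim_where(
--     # https://docs.python.org/3.8/library/collections.abc.html#collections-abstract-base-classes
--     sequence: typing.Sequence,
--     condition: typing.Sequence[bool],
-- ) -> typing.Sequence:
--     start = 0
--     for item_condition in condition:
--         if item_condition:
--             start += 1
--         else:
--             break
--     stop = len(sequence)
--     assert stop == len(condition)
--     for item_condition in condition[::-1]:
--         if item_condition:
--             stop -= 1
--         else:
--             break
--     return sequence[start:stop]
-- ===== SOURCE B (Python) =====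
-- def trim_where(sequence, condition):
--     assert len(sequence) == len(condition)
--     falses = [i for i, c in enumerate(condition) if not c]
--     if not falses:
--         return sequence[0:0]
--     return sequence[falses[0]:falses[-1] + 1]
-- ===== Notes on version B (the rewrite author's own statement) =====
-- stated objective: alternative
-- what changed: Replaces the two early-breaking boundary scans (forward and over the reversed sequence) by one full pass that collects all falsy indices and slices between the first and last of them.
import Mathlib
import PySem

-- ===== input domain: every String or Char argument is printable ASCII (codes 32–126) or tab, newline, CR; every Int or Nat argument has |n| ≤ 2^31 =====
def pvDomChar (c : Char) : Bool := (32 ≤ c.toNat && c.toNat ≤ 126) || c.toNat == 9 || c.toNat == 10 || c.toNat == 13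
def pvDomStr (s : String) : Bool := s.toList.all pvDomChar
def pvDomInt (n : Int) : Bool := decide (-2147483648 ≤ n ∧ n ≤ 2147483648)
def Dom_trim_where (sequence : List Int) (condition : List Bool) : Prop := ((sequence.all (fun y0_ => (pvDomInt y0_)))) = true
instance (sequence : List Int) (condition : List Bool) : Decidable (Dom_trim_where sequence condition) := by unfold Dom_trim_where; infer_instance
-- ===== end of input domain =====

-- B replaces A's two early-breaking boundary scans by one full pass collecting
-- the falsy indices and slicing between the first and last of them (alternative, same cost).


-- ===== PORT A =====
-- 'for item_condition in condition: if item_condition: start += 1 else: break'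
def pvLeadTrue : List Bool → Nat
  | [] => 0
  | c :: cs => if c then pvLeadTrue cs + 1 else 0

def trim_where (sequence : List Int) (condition : List Bool) : List Int :=
  let start : Nat := pvLeadTrue condition
  -- stop starts at len(sequence) and is decremented once per leading True of condition[::-1]
  let stop : Nat := sequence.length - pvLeadTrue condition.reverse
  PySem.List.slice sequence (some (start : Int)) (some (stop : Int))

-- ===== PORT B =====
-- '[i for i, c in enumerate(condition) if not c]'
def pvFalses (i : Nat) : List Bool → List Nat
  | [] => []
  | c :: cs => if !c then i :: pvFalses (i + 1) cs else pvFalses (i + 1) cs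

def trim_where_alt (sequence : List Int) (condition : List Bool) : List Int :=
  match pvFalses 0 condition with
  | [] => PySem.List.slice sequence (some 0) (some 0)
  | f :: rest =>
      PySem.List.slice sequence (some (f : Int))
        (some (((f :: rest).getLast (by simp) : Int) + 1))

-- ===== PRECONDITION & SPEC =====
-- A asserts len(sequence) == len(condition); on a mismatch it raises AssertionError.
def Pre_trim_where (sequence : List Int) (condition : List Bool) : Prop :=
  sequence.length = condition.length
instance (sequence : List Int) (condition : List Bool) : Decidable (Pre_trim_where sequence condition) := by unfold Pre_trim_where; infer_instance

def pvWitness_trim_where : List Int × List Bool := ([5, 1, 2, 9], [true, false, true, true])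

def Spec_trim_where (sequence : List Int) (condition : List Bool) (out : List Int) : Prop := out = trim_where_alt sequence condition
instance (sequence : List Int) (condition : List Bool) (out : List Int) : Decidable (Spec_trim_where sequence condition out) := by unfold Spec_trim_where; infer_instance

-- ===== CLAIM (what is proved, stated in full; the proofs are below) =====
def Claim_equal_trim_where : Prop := ∀ (sequence : List Int) (condition : List Bool), Dom_trim_where sequence condition → Pre_trim_where sequence condition → Spec_trim_where sequence condition (trim_where sequence condition)

-- ===== LEMMAS AND PROOFS =====

theorem pvLeadTrue_le (cs : List Bool) : pvLeadTrue cs ≤ cs.length := by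
  induction cs with
  | nil => simp [pvLeadTrue]
  | cons c cs ih => simp only [pvLeadTrue]; split <;> simp; omega

theorem pvFalses_nil_iff (i : Nat) (cs : List Bool) :
    pvFalses i cs = [] ↔ ∀ c ∈ cs, c = true := by
  induction cs generalizing i with
  | nil => simp [pvFalses]
  | cons c cs ih =>
    cases c <;> simp [pvFalses, ih]

theorem pvLeadTrue_all_true (cs : List Bool) (h : ∀ c ∈ cs, c = true) :
    pvLeadTrue cs = cs.length := by
  induction cs with
  | nil => rfl
  | cons c cs ih =>
    have hc := h c (by simp)
    subst hc
    simp only [pvLeadTrue, List.length_cons]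
    exact congrArg (· + 1) (ih fun x hx => h x (by simp [hx]))

theorem pvFalses_head (i f : Nat) (rest : List Nat) (cs : List Bool)
    (h : pvFalses i cs = f :: rest) : f = i + pvLeadTrue cs := by
  induction cs generalizing i f rest with
  | nil => simp [pvFalses] at h
  | cons c cs ih =>
    cases c with
    | false =>
      simp [pvFalses] at h
      simp [pvLeadTrue, h.1]
    | true =>
      simp [pvFalses] at h
      have := ih (i + 1) f rest h
      simp [pvLeadTrue]
      omega

theorem pvFalses_append (i : Nat) (xs ys : List Bool) :
    pvFalses i (xs ++ ys) = pvFalses i xs ++ pvFalses (i + xs.length) ys := by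
  induction xs generalizing i with
  | nil => simp [pvFalses]
  | cons c cs ih =>
    cases c <;> simp [pvFalses, ih (i + 1)] <;> ring_nf

theorem pvFalses_last (i : Nat) (cs : List Bool) (l : Nat)
    (h : (pvFalses i cs).getLast? = some l) :
    l + 1 + pvLeadTrue cs.reverse = i + cs.length := by
  induction cs using List.reverseRecOn with
  | nil => simp [pvFalses] at h
  | append_singleton cs c ih =>
    rw [pvFalses_append] at h
    cases c with
    | false =>
      simp [pvFalses, List.getLast?_append] at h
      simp [pvLeadTrue, ← h]
      omega
    | true =>
      simp [pvFalses] at h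
      have := ih h
      simp [pvLeadTrue]
      omega

-- ===== VERDICT (by name: the statement is the Claim_ definition above) =====
theorem trim_where_spec : Claim_equal_trim_where := by
  intro seq cond _ hpre
  unfold Spec_trim_where trim_where trim_where_alt
  cases h : pvFalses 0 cond with
  | nil =>
    have hall := (pvFalses_nil_iff 0 cond).mp h
    have h1 : pvLeadTrue cond = cond.length := pvLeadTrue_all_true cond hall
    have h2 : pvLeadTrue cond.reverse = cond.length := by
      rw [pvLeadTrue_all_true cond.reverse (fun c hc => hall c (List.mem_reverse.mp hc))]
      simp
    simp only [h1, h2, Pre_trim_where] at *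
    rw [hpre]
    have hz : cond.length - cond.length = 0 := by omega
    rw [hz]
    rw [PySem.List.slice_toNat seq (by positivity) (by norm_num),
        PySem.List.slice_toNat seq (by norm_num) (by norm_num)]
    simp
  | cons f rest =>
    have hf : f = pvLeadTrue cond := by
      have := pvFalses_head 0 f rest cond h; omega
    have hl : ((f :: rest).getLast (by simp)) + 1 + pvLeadTrue cond.reverse = cond.length := by
      have hsome : (pvFalses 0 cond).getLast? = some ((f :: rest).getLast (by simp)) := by
        rw [h]; exact List.getLast?_eq_some_getLast _
      have := pvFalses_last 0 cond _ hsome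
      omega
    have hle : pvLeadTrue cond.reverse ≤ cond.length := by
      have := pvLeadTrue_le cond.reverse; simpa using this
    have hstop : seq.length - pvLeadTrue cond.reverse = (f :: rest).getLast (by simp) + 1 := by
      have := hpre; unfold Pre_trim_where at this; omega
    rw [hstop, hf]
    norm_cast

-- excluded: length-mismatched inputs, on which A raises AssertionError
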